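-- pv_equiv track=rewrite | github.com/angrysky56/ai-socratic-clarifier | socratic_clarifier/integrations/sot_integration.py | _generate_conceptual_chaining
-- ===== SOURCE A (Python) =====
-- from typing import List, Dict, Any, Optional
--
-- def _generate_conceptual_chaining(text: str, issues: List[Dict[str, Any]]) -> str:
--     """Generate reasoning using the conceptual chaining paradigm."""
--     # Extract issue types and terms
--     issue_types = [issue.get("issue", "unknown") for issue in issues]
--     terms = [issue.get("term", "") for issue in issues]
--
--     # Build chains based on the issues
--     chains = []
--
--     # Handle bias-related issues
--     if any("bias" in issue_type for issue_type in issue_types):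
--         bias_terms = [term for i, term in enumerate(terms) if "bias" in issue_types[i]]
--         if bias_terms:
--             chains.append(f"#{bias_terms[0]} → #implicit_bias → #needs_neutrality")
--
--     # Handle ambiguity/vagueness issues
--     if any("vague" in issue_type for issue_type in issue_types):
--         vague_terms = [term for i, term in enumerate(terms) if "vague" in issue_types[i]]
--         if vague_terms:
--             chains.append(f"#{vague_terms[0]} → #ambiguity → #requires_precision")
--
--     # Handle reference issues
--     if any("reference" in issue_type for issue_type in issue_types):
--         ref_terms = [term for i, term in enumerate(terms) if "reference" in issue_types[i]]
--         if ref_terms: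
--             chains.append(f"#{ref_terms[0]} → #unclear_antecedent → #needs_specificity")
--
--     # Handle stereotype issues
--     if any("stereotype" in issue_type for issue_type in issue_types):
--         stereotype_terms = [term for i, term in enumerate(terms) if "stereotype" in issue_types[i]]
--         if stereotype_terms:
--             chains.append(f"#{stereotype_terms[0]} → #generalization → #requires_evidence")
--
--     # If no specific chains were created, use a general one
--     if not chains:
--         # Use the first issue as a fallback
--         first_term = terms[0] if terms else "text"
--         first_issue = issue_types[0] if issue_types else "issue"
--         chains.append(f"#{first_term} → #{first_issue} → #needs_clarification")
--
--     # Combine all chains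
--     reasoning = "<think>\n" + "\n".join(chains) + "\n</think>"
--     return reasoning
-- ===== SOURCE B (Python) =====
-- _TABLE = [
--     ("bias", " \u2192 #implicit_bias \u2192 #needs_neutrality"),
--     ("vague", " \u2192 #ambiguity \u2192 #requires_precision"),
--     ("reference", " \u2192 #unclear_antecedent \u2192 #needs_specificity"),
--     ("stereotype", " \u2192 #generalization \u2192 #requires_evidence"),
-- ]
--
--
-- def _generate_conceptual_chaining(text, issues):
--     """One pass over the issues recording, per keyword, the first matching term;
--     then one pass over the keyword table to emit the chains."""
--     first = {}
--     for issue in issues: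
--         itype = issue.get("issue", "unknown")
--         term = issue.get("term", "")
--         for kw, _ in _TABLE:
--             if kw in itype and kw not in first:
--                 first[kw] = term
--     chains = ["#" + first[kw] + suffix for kw, suffix in _TABLE if kw in first]
--     if not chains:
--         if issues:
--             chains = ["#" + issues[0].get("term", "") + " \u2192 #"
--                       + issues[0].get("issue", "unknown") + " \u2192 #needs_clarification"]
--         else:
--             chains = ["#text \u2192 #issue \u2192 #needs_clarification"]
--     return "<think>\n" + "\n".join(chains) + "\n</think>"
-- ===== Notes on version B (the rewrite author's own statement) =====
-- stated objective: simpler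
-- what changed: A runs four keyword-specific blocks, each rescanning the issue list twice (an any() test plus an enumerate/index comprehension); B makes one pass over the issues recording the first matching term per keyword in a dict, then one loop over a keyword/template table emits the chains.
import Mathlib
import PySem

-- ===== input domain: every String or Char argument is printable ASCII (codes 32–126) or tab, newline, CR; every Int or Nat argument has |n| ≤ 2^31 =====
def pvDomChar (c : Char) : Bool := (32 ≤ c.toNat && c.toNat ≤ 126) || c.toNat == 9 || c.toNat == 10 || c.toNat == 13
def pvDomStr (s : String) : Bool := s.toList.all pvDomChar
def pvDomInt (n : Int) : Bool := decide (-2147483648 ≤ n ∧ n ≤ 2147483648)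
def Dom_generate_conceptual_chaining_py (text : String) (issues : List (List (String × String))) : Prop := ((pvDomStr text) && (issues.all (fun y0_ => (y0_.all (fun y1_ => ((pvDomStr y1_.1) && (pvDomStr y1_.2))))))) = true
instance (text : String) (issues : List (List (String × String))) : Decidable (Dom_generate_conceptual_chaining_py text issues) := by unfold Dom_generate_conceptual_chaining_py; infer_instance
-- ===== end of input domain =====

-- B replaces A's four keyword-specific scan-and-branch blocks by a single pass over the
-- issues that records, per keyword, the first matching term, followed by one loop over a
-- keyword/template table (objective: simpler decomposition, one pass over the data).

-- ===== PORT A =====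
-- shared helper: issue.get(key, default) on an association-list dict (first match)
def pvGetD (d : List (String × String)) (k dfl : String) : String :=
  PySem.Dict.getD (PySem.Dict.mk d) k dfl

def generate_conceptual_chaining_py (text : String) (issues : List (List (String × String))) : String :=
  let issue_types := issues.map (fun issue => pvGetD issue "issue" "unknown")
  let terms := issues.map (fun issue => pvGetD issue "term" "")
  let chains : List String := []
  let chains := if issue_types.any (fun t => PySem.Str.isIn "bias" t) then
      let bias_terms := (PySem.List.enumerate terms 0).filterMap
        (fun p => if PySem.Str.isIn "bias" (PySem.List.pyGetD issue_types p.1 "") then some p.2 else none)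
      match bias_terms with
      | t :: _ => chains ++ ["#" ++ t ++ " → #implicit_bias → #needs_neutrality"]
      | [] => chains
    else chains
  let chains := if issue_types.any (fun t => PySem.Str.isIn "vague" t) then
      let vague_terms := (PySem.List.enumerate terms 0).filterMap
        (fun p => if PySem.Str.isIn "vague" (PySem.List.pyGetD issue_types p.1 "") then some p.2 else none)
      match vague_terms with
      | t :: _ => chains ++ ["#" ++ t ++ " → #ambiguity → #requires_precision"]
      | [] => chains
    else chains
  let chains := if issue_types.any (fun t => PySem.Str.isIn "reference" t) then
      let ref_terms := (PySem.List.enumerate terms 0).filterMap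
        (fun p => if PySem.Str.isIn "reference" (PySem.List.pyGetD issue_types p.1 "") then some p.2 else none)
      match ref_terms with
      | t :: _ => chains ++ ["#" ++ t ++ " → #unclear_antecedent → #needs_specificity"]
      | [] => chains
    else chains
  let chains := if issue_types.any (fun t => PySem.Str.isIn "stereotype" t) then
      let stereotype_terms := (PySem.List.enumerate terms 0).filterMap
        (fun p => if PySem.Str.isIn "stereotype" (PySem.List.pyGetD issue_types p.1 "") then some p.2 else none)
      match stereotype_terms with
      | t :: _ => chains ++ ["#" ++ t ++ " → #generalization → #requires_evidence"]
      | [] => chains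
    else chains
  let chains := if chains.isEmpty then
      let first_term := match terms with | t :: _ => t | [] => "text"
      let first_issue := match issue_types with | t :: _ => t | [] => "issue"
      chains ++ ["#" ++ first_term ++ " → #" ++ first_issue ++ " → #needs_clarification"]
    else chains
  "<think>\n" ++ PySem.Str.join "\n" chains ++ "\n</think>"

-- ===== PORT B =====
def pvTable : List (String × String) :=
  [("bias", " → #implicit_bias → #needs_neutrality"),
   ("vague", " → #ambiguity → #requires_precision"),
   ("reference", " → #unclear_antecedent → #needs_specificity"),
   ("stereotype", " → #generalization → #requires_evidence")]

def generate_conceptual_chaining_py_alt (text : String) (issues : List (List (String × String))) : String :=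
  let first := issues.foldl (fun first issue =>
      let itype := pvGetD issue "issue" "unknown"
      let term := pvGetD issue "term" ""
      pvTable.foldl (fun first p =>
        if PySem.Str.isIn p.1 itype && !(first.contains p.1) then first.insert p.1 term else first) first)
    (PySem.Dict.empty : PySem.Dict String String)
  let chains := pvTable.filterMap (fun p =>
    if first.contains p.1 then some ("#" ++ first.getD p.1 "" ++ p.2) else none)
  let chains := if chains.isEmpty then
      match issues with
      | [] => ["#text → #issue → #needs_clarification"]
      | i0 :: _ => ["#" ++ pvGetD i0 "term" "" ++ " → #" ++ pvGetD i0 "issue" "unknown" ++ " → #needs_clarification"]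
    else chains
  "<think>\n" ++ PySem.Str.join "\n" chains ++ "\n</think>"

-- ===== PRECONDITION & SPEC =====
def Spec_generate_conceptual_chaining_py (text : String) (issues : List (List (String × String))) (out : String) : Prop := out = generate_conceptual_chaining_py_alt text issues
instance (text : String) (issues : List (List (String × String))) (out : String) : Decidable (Spec_generate_conceptual_chaining_py text issues out) := by unfold Spec_generate_conceptual_chaining_py; infer_instance

-- ===== CLAIM (what is proved, stated in full; the proofs are below) =====
def Claim_equal_generate_conceptual_chaining_py : Prop := ∀ (text : String) (issues : List (List (String × String))), Dom_generate_conceptual_chaining_py text issues → Spec_generate_conceptual_chaining_py text issues (generate_conceptual_chaining_py text issues)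

-- ===== LEMMAS AND PROOFS =====

-- A's comprehension over enumerate/indexing equals the direct filterMap over the issues
theorem pv_enum_filter (kw : String) (issues : List (List (String × String))) :
    ∀ (pre : List String),
      (PySem.List.enumerate (issues.map (fun x => pvGetD x "term" "")) (pre.length : Int)).filterMap
        (fun p => if PySem.Str.isIn kw
            (PySem.List.pyGetD (pre ++ issues.map (fun x => pvGetD x "issue" "unknown")) p.1 "") then some p.2 else none)
      = issues.filterMap (fun x =>
          if PySem.Str.isIn kw (pvGetD x "issue" "unknown") then some (pvGetD x "term" "") else none) := by
  induction issues with
  | nil => intro pre; simp [PySem.List.enumerate_nil]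
  | cons x xs ih =>
    intro pre
    simp only [List.map_cons, PySem.List.enumerate_cons, List.filterMap_cons]
    have h1 : PySem.List.pyGetD (pre ++ pvGetD x "issue" "unknown" :: xs.map (fun x => pvGetD x "issue" "unknown")) ((pre.length : Int)) ""
        = pvGetD x "issue" "unknown" := by
      rw [PySem.List.pyGetD_natCast]
      simp [List.getD]
    have h2 : (pre.length : Int) + 1 = ((pre ++ [pvGetD x "issue" "unknown"]).length : Int) := by
      simp only [List.length_append, List.length_cons, List.length_nil]; push_cast; omega
    have h3 : pre ++ pvGetD x "issue" "unknown" :: xs.map (fun x => pvGetD x "issue" "unknown")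
        = (pre ++ [pvGetD x "issue" "unknown"]) ++ xs.map (fun x => pvGetD x "issue" "unknown") :=
      List.append_cons _ _ _
    simp only [h1]
    split
    · simp only [h2, h3, ih]
    · simp only [h2, h3, ih]

theorem pv_enum_filter0 (kw : String) (issues : List (List (String × String))) :
    (PySem.List.enumerate (issues.map (fun x => pvGetD x "term" "")) 0).filterMap
        (fun p => if PySem.Str.isIn kw
            (PySem.List.pyGetD (issues.map (fun x => pvGetD x "issue" "unknown")) p.1 "") then some p.2 else none)
      = issues.filterMap (fun x =>
          if PySem.Str.isIn kw (pvGetD x "issue" "unknown") then some (pvGetD x "term" "") else none) := by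
  simpa using pv_enum_filter kw issues []

-- first matching term for a keyword, in issue order (the canonical form both ports reduce to)
def pvSel (kw : String) (issues : List (List (String × String))) : Option String :=
  (issues.filterMap (fun x =>
    if PySem.Str.isIn kw (pvGetD x "issue" "unknown") then some (pvGetD x "term" "") else none)).head?

theorem pv_any_iff (kw : String) (issues : List (List (String × String))) :
    (issues.map (fun x => pvGetD x "issue" "unknown")).any (fun t => PySem.Str.isIn kw t)
      = (pvSel kw issues).isSome := by
  induction issues with
  | nil => rfl
  | cons x xs ih =>
    unfold pvSel at ih ⊢
    simp only [List.filterMap_cons] at ih ⊢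
    simp at ih ⊢
    by_cases h : PySem.Chars.isIn kw.toList (pvGetD x "issue" "unknown").toList = true
    · simp [h]
    · simp [h, ih]

-- one update step, at a key distinct from the step's key, is invisible
theorem pv_step_ne (d : PySem.Dict String String) (c : Bool) (k k' v : String) (h : k' ≠ k) :
    (if c then d.insert k v else d).get? k' = d.get? k' := by
  split
  · exact PySem.Dict.get?_insert_of_ne d v h
  · rfl

theorem pv_step_self (d : PySem.Dict String String) (P : Bool) (k v : String) :
    (if P && !(d.contains k) then d.insert k v else d).get? k
      = (d.get? k).orElse (fun _ => if P then some v else none) := by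
  rw [PySem.Dict.contains_eq_isSome_get?]
  cases hg : d.get? k with
  | some w => cases P <;> simp [hg]
  | none => cases P <;> simp [hg, PySem.Dict.get?_insert_self]

theorem pv_inner_get (kw : String)
    (hkw : kw = "bias" ∨ kw = "vague" ∨ kw = "reference" ∨ kw = "stereotype")
    (d : PySem.Dict String String) (itype term : String) :
    (pvTable.foldl (fun first p =>
        if PySem.Str.isIn p.1 itype && !(first.contains p.1) then first.insert p.1 term else first) d).get? kw
      = (d.get? kw).orElse (fun _ => if PySem.Str.isIn kw itype then some term else none) := by
  simp only [pvTable, List.foldl_cons, List.foldl_nil]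
  rcases hkw with h | h | h | h <;> subst h <;>
    · repeat first
        | rw [pv_step_self]
        | rw [pv_step_ne _ _ _ _ _ (by decide)]

theorem pv_fold_get (kw : String)
    (hkw : kw = "bias" ∨ kw = "vague" ∨ kw = "reference" ∨ kw = "stereotype")
    (issues : List (List (String × String))) :
    ∀ (d : PySem.Dict String String),
      (issues.foldl (fun first issue =>
        pvTable.foldl (fun first p =>
          if PySem.Str.isIn p.1 (pvGetD issue "issue" "unknown") && !(first.contains p.1)
          then first.insert p.1 (pvGetD issue "term" "") else first) first) d).get? kw
      = (d.get? kw).orElse (fun _ => pvSel kw issues) := by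
  induction issues with
  | nil =>
    intro d
    rw [List.foldl_nil]
    cases d.get? kw <;> rfl
  | cons x xs ih =>
    intro d
    rw [List.foldl_cons, ih, pv_inner_get kw hkw]
    unfold pvSel
    rw [List.filterMap_cons]
    cases h : (if PySem.Str.isIn kw (pvGetD x "issue" "unknown") = true
        then some (pvGetD x "term" "") else none) with
    | some t => cases d.get? kw <;> simp
    | none => cases d.get? kw <;> simp

-- A's per-keyword block appends the chain built from the first matching term (if any)
theorem pv_chain_block (chains : List String) (kw suf : String)
    (issues : List (List (String × String))) :
    (if (issues.map (fun x => pvGetD x "issue" "unknown")).any (fun t => PySem.Str.isIn kw t) then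
       match (PySem.List.enumerate (issues.map (fun x => pvGetD x "term" "")) 0).filterMap
           (fun p => if PySem.Str.isIn kw
               (PySem.List.pyGetD (issues.map (fun x => pvGetD x "issue" "unknown")) p.1 "")
             then some p.2 else none) with
       | t :: _ => chains ++ ["#" ++ t ++ suf]
       | [] => chains
     else chains)
    = chains ++ ((pvSel kw issues).map (fun t => "#" ++ t ++ suf)).toList := by
  rw [pv_any_iff, pv_enum_filter0]
  unfold pvSel
  cases issues.filterMap (fun x =>
      if PySem.Str.isIn kw (pvGetD x "issue" "unknown") then some (pvGetD x "term" "") else none) with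
  | nil => simp
  | cons t ts => simp

-- ===== VERDICT (by name: the statement is the Claim_ definition above) =====
theorem generate_conceptual_chaining_py_spec : Claim_equal_generate_conceptual_chaining_py := by
  intro text issues _
  unfold Spec_generate_conceptual_chaining_py
  have hb := pv_fold_get "bias" (Or.inl rfl) issues PySem.Dict.empty
  have hv := pv_fold_get "vague" (Or.inr (Or.inl rfl)) issues PySem.Dict.empty
  have hr := pv_fold_get "reference" (Or.inr (Or.inr (Or.inl rfl))) issues PySem.Dict.empty
  have hs := pv_fold_get "stereotype" (Or.inr (Or.inr (Or.inr rfl))) issues PySem.Dict.empty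
  unfold generate_conceptual_chaining_py generate_conceptual_chaining_py_alt
  simp only [pvTable, List.foldl_cons, List.foldl_nil, PySem.Dict.contains_eq_isSome_get?,
    PySem.Dict.getD_eq_get?_getD, PySem.Dict.get?_empty, Option.orElse_eq_or,
    Option.none_or] at hb hv hr hs ⊢
  simp only [pv_chain_block, List.filterMap_cons, List.filterMap_nil]
  simp only [hb, hv, hr, hs]
  cases pvSel "bias" issues <;> cases pvSel "vague" issues <;>
    cases pvSel "reference" issues <;> cases pvSel "stereotype" issues <;>
    cases issues <;> simp
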